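-- pv_equiv track=rewrite | github.com/jovejp/AoC2024 | python/day12/main.py | get_c
-- ===== SOURCE A (Python) =====
-- directions = [(0, 1), (0, -1), (1, 0), (-1, 0)]  # right, left, down, up
--
-- def get_c(sub_area):
--     total_c = 0
--     for node in sub_area:
--         x, y = node
--         tmp_c = 4
--         for dx, dy in directions:
--             nx, ny = x + dx, y + dy
--             if (nx, ny) in sub_area:
--                 tmp_c -= 1
--         total_c += tmp_c
--     return total_c
-- ===== SOURCE B (Python) =====
-- def get_c(sub_area):
--     mult = {}
--     for node in sub_area:
--         mult[node] = mult.get(node, 0) + 1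
--     edge_w = 0
--     for (x, y), m in mult.items():
--         for q in ((x, y + 1), (x + 1, y)):
--             if q in mult:
--                 edge_w += m + mult[q]
--     return 4 * len(sub_area) - edge_w
-- ===== Notes on version B (the rewrite author's own statement) =====
-- stated objective: alternative
-- what changed: B counts edge-centrically: it builds a multiplicity counter once, starts from the closed form 4*len(sub_area), and subtracts for each distinct cell and each of its right/down neighbours present the sum of the two endpoint multiplicities, instead of A's per-occurrence scan over all four directions with a linear list membership test.
import Mathlib
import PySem

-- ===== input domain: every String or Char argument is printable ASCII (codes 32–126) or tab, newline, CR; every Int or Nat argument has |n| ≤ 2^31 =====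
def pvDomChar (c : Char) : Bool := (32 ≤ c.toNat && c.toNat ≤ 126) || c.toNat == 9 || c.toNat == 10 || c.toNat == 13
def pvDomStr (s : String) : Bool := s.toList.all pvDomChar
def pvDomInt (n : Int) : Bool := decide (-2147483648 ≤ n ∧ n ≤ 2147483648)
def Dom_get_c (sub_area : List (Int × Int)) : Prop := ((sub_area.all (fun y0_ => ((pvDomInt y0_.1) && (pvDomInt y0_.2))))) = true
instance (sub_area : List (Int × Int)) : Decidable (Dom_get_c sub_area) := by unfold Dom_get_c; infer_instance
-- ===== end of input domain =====

-- B is edge-centric: total perimeter = 4*len(sub_area) minus, for each distinct cell and each of its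
-- right/down neighbours present, the two endpoint multiplicities — replacing A's per-occurrence
-- four-direction linear membership scan (objective: alternative).

-- ===== PORT A =====
def directions : List (Int × Int) := [(0, 1), (0, -1), (1, 0), (-1, 0)]

def get_c (sub_area : List (Int × Int)) : Int :=
  sub_area.foldl (fun total_c node =>
    let x := node.1; let y := node.2
    let tmp_c := directions.foldl (fun tmp_c d =>
      if (x + d.1, y + d.2) ∈ sub_area then tmp_c - 1 else tmp_c) 4
    total_c + tmp_c) 0

-- ===== PORT B =====
def get_c_alt (sub_area : List (Int × Int)) : Int :=
  let mult : PySem.Dict (Int × Int) Int :=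
    sub_area.foldl (fun d node => d.insert node (d.getD node 0 + 1)) PySem.Dict.empty
  let edge_w : Int :=
    mult.items.foldl (fun ew pm =>
      let x := pm.1.1; let y := pm.1.2; let m := pm.2
      [(x, y + 1), (x + 1, y)].foldl (fun ew q =>
        if mult.contains q then ew + (m + mult.getD q 0) else ew) ew) 0
  4 * PySem.List.len sub_area - edge_w

-- ===== PRECONDITION & SPEC =====
def Spec_get_c (sub_area : List (Int × Int)) (out : Int) : Prop := out = get_c_alt sub_area
instance (sub_area : List (Int × Int)) (out : Int) : Decidable (Spec_get_c sub_area out) := by unfold Spec_get_c; infer_instance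

-- ===== CLAIM (what is proved, stated in full; the proofs are below) =====
def Claim_equal_get_c : Prop := ∀ (sub_area : List (Int × Int)), Dom_get_c sub_area → Spec_get_c sub_area (get_c sub_area)

-- ===== LEMMAS AND PROOFS =====

-- number of the four orthogonal neighbours of p present in xs
def deg4 (xs : List (Int × Int)) (p : Int × Int) : Int :=
  (if (p.1, p.2 + 1) ∈ xs then 1 else 0) + (if (p.1, p.2 - 1) ∈ xs then 1 else 0) +
  (if (p.1 + 1, p.2) ∈ xs then 1 else 0) + (if (p.1 - 1, p.2) ∈ xs then 1 else 0)

-- weighted right/down edge contribution of one distinct cell (B's per-key summand)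
def edgeW (xs : List (Int × Int)) (k : Int × Int) : Int :=
  (if (k.1, k.2 + 1) ∈ xs then (xs.count k : Int) + (xs.count (k.1, k.2 + 1) : Int) else 0) +
  (if (k.1 + 1, k.2) ∈ xs then (xs.count k : Int) + (xs.count (k.1 + 1, k.2) : Int) else 0)

theorem inner_eq (xs : List (Int × Int)) (p : Int × Int) :
    directions.foldl (fun tmp_c d => if (p.1 + d.1, p.2 + d.2) ∈ xs then tmp_c - 1 else tmp_c) 4
      = 4 - deg4 xs p := by
  simp only [directions, List.foldl, deg4, add_zero, ← sub_eq_add_neg]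
  split_ifs <;> norm_num

theorem sum_four_sub (l : List (Int × Int)) (d : (Int × Int) → Int) :
    0 + (l.map (fun p => 4 - d p)).sum = 4 * l.length - (l.map d).sum := by
  induction l with
  | nil => simp
  | cons h t ih => simp_all; ring

theorem getc_eq_sum (xs : List (Int × Int)) :
    get_c xs = 4 * xs.length - (xs.map (deg4 xs)).sum := by
  unfold get_c
  dsimp only
  simp only [inner_eq]
  rw [PySem.List.foldl_add (g := fun p => 4 - deg4 xs p)]
  exact sum_four_sub xs (deg4 xs)

theorem getc_alt_eq_sum (xs : List (Int × Int)) :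
    get_c_alt xs = 4 * xs.length - ((PySem.Set.ofList xs).map (edgeW xs)).sum := by
  unfold get_c_alt
  rw [PySem.Dict.foldl_insert_getD_add_one_eq_counter]
  simp only [PySem.Dict.items_counter, PySem.List.len_eq, List.foldl_map, List.foldl]
  simp only [PySem.Dict.contains_counter, PySem.Dict.getD_counter]
  congr 1
  have hf : (fun (ew : Int) (y : Int × Int) =>
        if xs.contains (y.1 + 1, y.2) = true then
          (if xs.contains (y.1, y.2 + 1) = true then ew + (↑(List.count y xs) + ↑(List.count (y.1, y.2 + 1) xs))
            else ew) + (↑(List.count y xs) + ↑(List.count (y.1 + 1, y.2) xs))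
        else
          if xs.contains (y.1, y.2 + 1) = true then ew + (↑(List.count y xs) + ↑(List.count (y.1, y.2 + 1) xs)) else ew)
      = fun ew y => ew + edgeW xs y := by
    funext ew y
    simp only [edgeW, List.contains_iff_mem]
    split_ifs <;> ring
  rw [hf, PySem.List.foldl_add (g := edgeW xs)]
  simp

theorem shift_sum (T : Finset (Int × Int)) (c : (Int × Int) → Int) (a b : Int) :
    (∑ k ∈ T, if (k.1 - a, k.2 - b) ∈ T then c k else 0)
      = ∑ k ∈ T, if (k.1 + a, k.2 + b) ∈ T then c (k.1 + a, k.2 + b) else 0 := by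
  rw [← Finset.sum_filter, ← Finset.sum_filter]
  apply Finset.sum_nbij' (i := fun k => (k.1 - a, k.2 - b)) (j := fun k => (k.1 + a, k.2 + b))
  · intro x hx; simp_all [Finset.mem_filter]
  · intro x hx; simp_all [Finset.mem_filter]
  · intro x hx; simp
  · intro x hx; simp
  · intro x hx; simp_all [Finset.mem_filter]

theorem key_identity (xs : List (Int × Int)) :
    ((PySem.Set.ofList xs).map (fun k => (xs.count k : Int) * deg4 xs k)).sum
      = ((PySem.Set.ofList xs).map (edgeW xs)).sum := by
  have hnd := PySem.Set.nodup_ofList xs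
  rw [← List.sum_toFinset _ hnd, ← List.sum_toFinset _ hnd]
  set T := (PySem.Set.ofList xs).toFinset with hT
  have hmem : ∀ q : Int × Int, q ∈ xs ↔ q ∈ T := by
    intro q; simp [hT, PySem.Set.mem_ofList]
  set c : (Int × Int) → Int := fun k => (xs.count k : Int) with hc
  calc ∑ k ∈ T, c k * deg4 xs k
      = (∑ k ∈ T, if (k.1, k.2 + 1) ∈ T then c k else 0)
        + ((∑ k ∈ T, if (k.1 - 0, k.2 - 1) ∈ T then c k else 0)
        + ((∑ k ∈ T, if (k.1 + 1, k.2) ∈ T then c k else 0)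
        + (∑ k ∈ T, if (k.1 - 1, k.2 - 0) ∈ T then c k else 0))) := by
        rw [← Finset.sum_add_distrib, ← Finset.sum_add_distrib, ← Finset.sum_add_distrib]
        apply Finset.sum_congr rfl; intro k hk
        simp only [deg4, hmem, sub_zero]
        split_ifs <;> ring
    _ = (∑ k ∈ T, if (k.1, k.2 + 1) ∈ T then c k else 0)
        + ((∑ k ∈ T, if (k.1 + 0, k.2 + 1) ∈ T then c (k.1 + 0, k.2 + 1) else 0)
        + ((∑ k ∈ T, if (k.1 + 1, k.2) ∈ T then c k else 0)
        + (∑ k ∈ T, if (k.1 + 1, k.2 + 0) ∈ T then c (k.1 + 1, k.2 + 0) else 0))) := by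
        rw [shift_sum T c 0 1, shift_sum T c 1 0]
    _ = ∑ k ∈ T, edgeW xs k := by
        rw [← Finset.sum_add_distrib, ← Finset.sum_add_distrib, ← Finset.sum_add_distrib]
        apply Finset.sum_congr rfl; intro k hk
        simp only [edgeW, hmem, add_zero]
        split_ifs <;> ring

theorem sum_filter_eq_count (xs : List (Int × Int)) (f : (Int × Int) → Int) (k : Int × Int) :
    ((xs.filter (fun x => decide (x = k))).map f).sum = (xs.count k : Int) * f k := by
  induction xs with
  | nil => simp
  | cons x t ih =>
    by_cases hx : x = k
    · subst hx
      rw [List.filter_cons_of_pos (by simp), List.count_cons_self]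
      simp only [List.map_cons, List.sum_cons, ih]
      push_cast; ring
    · rw [List.filter_cons_of_neg (by simp [hx]), List.count_cons_of_ne hx]
      exact ih

theorem sum_filter_split (xs : List (Int × Int)) (f : (Int × Int) → Int) (k : Int × Int)
    (ks : List (Int × Int)) (hk : k ∉ ks) :
    ((xs.filter (fun x => decide (x = k ∨ x ∈ ks))).map f).sum
      = ((xs.filter (fun x => decide (x = k))).map f).sum
        + ((xs.filter (fun x => decide (x ∈ ks))).map f).sum := by
  induction xs with
  | nil => simp
  | cons x t ih =>
    by_cases hx : x = k
    · subst hx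
      rw [List.filter_cons_of_pos (by simp), List.filter_cons_of_pos (by simp),
        List.filter_cons_of_neg (by simp [hk])]
      simp only [List.map_cons, List.sum_cons, ih]
      ring
    · by_cases hx2 : x ∈ ks
      · rw [List.filter_cons_of_pos (by simp [hx2]), List.filter_cons_of_neg (by simp [hx]),
          List.filter_cons_of_pos (by simp [hx2])]
        simp only [List.map_cons, List.sum_cons, ih]
        ring
      · rw [List.filter_cons_of_neg (by simp [hx, hx2]), List.filter_cons_of_neg (by simp [hx]),
          List.filter_cons_of_neg (by simp [hx2])]
        exact ih

theorem sum_nodup_count (xs : List (Int × Int)) (f : (Int × Int) → Int)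
    (ks : List (Int × Int)) (hnd : ks.Nodup) :
    (ks.map (fun k => (xs.count k : Int) * f k)).sum
      = ((xs.filter (fun x => decide (x ∈ ks))).map f).sum := by
  induction ks with
  | nil => simp
  | cons k t ih =>
    rcases List.nodup_cons.mp hnd with ⟨hk, ht⟩
    simp only [List.mem_cons]
    rw [sum_filter_split xs f k t hk]
    simp only [List.map_cons, List.sum_cons]
    rw [sum_filter_eq_count xs f k, ih ht]

theorem sum_dedup_count (xs : List (Int × Int)) (f : (Int × Int) → Int) :
    ((PySem.Set.ofList xs).map (fun k => (xs.count k : Int) * f k)).sum = (xs.map f).sum := by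
  rw [sum_nodup_count xs f (PySem.Set.ofList xs) (PySem.Set.nodup_ofList xs)]
  congr 1
  rw [List.filter_eq_self.mpr]
  intro x hx
  simp [PySem.Set.mem_ofList, hx]

-- ===== VERDICT (by name: the statement is the Claim_ definition above) =====
theorem get_c_spec : Claim_equal_get_c := by
  intro xs _
  unfold Spec_get_c
  rw [getc_eq_sum, getc_alt_eq_sum, ← key_identity, sum_dedup_count]
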